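-- pv_equiv track=rewrite | github.com/DariusBotusanu/Own-Programming-Language | Compiler/compilator.py | detect_token
-- ===== SOURCE A (Python) =====
-- _NULL_STR = "*_*"
--
-- system_separators = [' ', ';', ':', '']
--
-- def detect_token(line):
--     if(len(line)==1):
--         copy_line = line[:]
--         line = _NULL_STR[:]
--         return copy_line
--     for i in range(len(line)):
--         if(line[i] in system_separators):
--             to_return = line[0:i]
--             line = line[i:]
--             return to_return
--         elif(i==len(line)-1):
--             to_return = line[:i]
--             line = _NULL_STR[:]
--             return to_return
-- ===== SOURCE B (Python) =====
-- def detect_token(line):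
--     if len(line) == 1:
--         return line
--     if not line:
--         return None
--     positions = [line.index(s) for s in (' ', ';', ':') if s in line]
--     if positions:
--         return line[:min(positions)]
--     return line[:len(line)-1]
-- ===== Notes on version B (the rewrite author's own statement) =====
-- stated objective: faster
-- what changed: Replaced the explicit Python-level index-by-index scan (with early returns) by computing the first occurrence of each separator present via str.index and cutting at the minimum position, falling back to dropping the last char when no separator occurs.
import Mathlib
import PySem

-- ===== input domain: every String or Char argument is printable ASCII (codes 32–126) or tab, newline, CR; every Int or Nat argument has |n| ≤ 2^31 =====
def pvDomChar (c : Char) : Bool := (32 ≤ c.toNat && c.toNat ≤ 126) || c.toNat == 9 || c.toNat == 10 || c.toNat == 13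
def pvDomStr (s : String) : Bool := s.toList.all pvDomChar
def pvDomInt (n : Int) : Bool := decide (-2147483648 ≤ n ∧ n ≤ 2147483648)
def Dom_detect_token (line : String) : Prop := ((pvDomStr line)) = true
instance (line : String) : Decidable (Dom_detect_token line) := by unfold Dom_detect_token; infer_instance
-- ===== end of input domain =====

-- B replaces A's char-by-char scan by min over per-separator first positions (str.index); measured faster by a constant factor (C-level scans instead of a Python loop).

-- system_separators without '': a one-character string can never equal '', so the '' entry never matches.
def pvSeps : List Char := [' ', ';', ':']

-- ===== PORT A =====
-- the for-loop of A: scan index i; first separator → line[0:i]; at the last index → line[:i]; else continue.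
-- Indices here are Nat: the loop index of `range(len(line))` is always in [0, len).
def dtLoop (cs : List Char) (i : Nat) : Option (List Char) :=
  if h : i < cs.length then
    if pvSeps.contains cs[i] then some (cs.take i)
    else if i = cs.length - 1 then some (cs.take i)
    else dtLoop cs (i + 1)
  else none
termination_by cs.length - i

def detect_token (line : String) : Option String :=
  let cs := line.toList
  if cs.length = 1 then some line
  else (dtLoop cs 0).map String.mk

-- ===== PORT B =====
def detect_token_alt (line : String) : Option String :=
  let cs := line.toList
  if cs.length = 1 then some line
  else if cs.length = 0 then none
  else
    -- positions = [line.index(s) for s in (' ',';',':') if s in line]; line.index = first index = idxOf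
    let positions := (pvSeps.filter (fun s => cs.contains s)).map (fun s => cs.idxOf s)
    match positions.min? with
    | some m => some (String.mk (cs.take m))              -- line[:min(positions)]
    | none => some (String.mk (cs.take (cs.length - 1)))  -- line[:len(line)-1], len ≥ 2

-- ===== PRECONDITION & SPEC =====
def Spec_detect_token (line : String) (out : Option String) : Prop := out = detect_token_alt line
instance (line : String) (out : Option String) : Decidable (Spec_detect_token line out) := by unfold Spec_detect_token; infer_instance

-- ===== CLAIM (what is proved, stated in full; the proofs are below) =====
def Claim_equal_detect_token : Prop := ∀ (line : String), Dom_detect_token line → Spec_detect_token line (detect_token line)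

-- ===== LEMMAS AND PROOFS =====

-- first index ≥ the position of any element satisfying p
theorem pv_findIdx_le {α : Type} (p : α → Bool) (l : List α) (j : Nat) (h : j < l.length)
    (hp : p l[j] = true) : l.findIdx p ≤ j := by
  induction l generalizing j with
  | nil => simp at h
  | cons a t ih =>
    cases j with
    | zero => simp_all [List.findIdx_cons]
    | succ k =>
      simp only [List.findIdx_cons]
      cases hpa : p a with
      | true => simp
      | false =>
        simp only [cond_false]
        have := ih k (by simpa using h) (by simpa using hp)
        omega

-- A's loop computes the prefix up to the first separator, capped at length-1
theorem dtLoop_eq (cs : List Char) (i : Nat) (h : i < cs.length) :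
    dtLoop cs i = some (cs.take (min (i + (cs.drop i).findIdx (fun c => pvSeps.contains c)) (cs.length - 1))) := by
  have hdrop : cs.drop i = cs[i] :: cs.drop (i + 1) := List.drop_eq_getElem_cons h
  rw [dtLoop]
  simp only [dif_pos h]
  by_cases hsep : pvSeps.contains cs[i] = true
  · rw [if_pos hsep]
    have hsep' : cs[i] ∈ pvSeps := by simpa using hsep
    have : (cs.drop i).findIdx (fun c => pvSeps.contains c) = 0 := by
      rw [hdrop, List.findIdx_cons]; simp [hsep']
    rw [this]
    have : min (i + 0) (cs.length - 1) = i := by omega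
    rw [this]
  · rw [if_neg hsep]
    have hfd : (cs.drop i).findIdx (fun c => pvSeps.contains c)
        = (cs.drop (i + 1)).findIdx (fun c => pvSeps.contains c) + 1 := by
      have hsep' : ¬ cs[i] ∈ pvSeps := by simpa using hsep
      rw [hdrop, List.findIdx_cons]; simp [hsep']
    by_cases hlast : i = cs.length - 1
    · rw [if_pos hlast]
      have : cs.drop (i + 1) = [] := List.drop_eq_nil_of_le (by omega)
      rw [hfd, this]
      simp only [List.findIdx_nil]
      have : min (i + (0 + 1)) (cs.length - 1) = i := by omega
      rw [this]
    · rw [if_neg hlast]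
      rw [dtLoop_eq cs (i + 1) (by omega), hfd]
      have : i + ((cs.drop (i + 1)).findIdx (fun c => pvSeps.contains c) + 1)
           = (i + 1) + (cs.drop (i + 1)).findIdx (fun c => pvSeps.contains c) := by omega
      rw [this]
termination_by cs.length - i

theorem detect_token_spec_aux (line : String) :
    detect_token line = detect_token_alt line := by
  simp only [detect_token, detect_token_alt]
  generalize line.toList = cs
  by_cases h1 : cs.length = 1
  · simp [h1]
  · simp only [if_neg h1]
    by_cases h0 : cs.length = 0
    · have hnil : cs = [] := List.eq_nil_of_length_eq_zero h0
      subst hnil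
      rw [dtLoop]
      simp
    · simp only [if_neg h0]
      have hlen : 0 < cs.length := Nat.pos_of_ne_zero h0
      rw [dtLoop_eq cs 0 hlen]
      simp only [Nat.zero_add, Option.map_some, List.drop_zero]
      set p : Char → Bool := fun c => pvSeps.contains c with hp
      set positions := (pvSeps.filter (fun s => cs.contains s)).map (fun s => cs.idxOf s) with hpos
      by_cases hany : ∃ c ∈ cs, p c = true
      · -- some separator occurs: findIdx < length, and min? positions = findIdx
        have hflt : cs.findIdx p < cs.length := by
          obtain ⟨c, hc, hpc⟩ := hany
          exact List.findIdx_lt_length.mpr ⟨c, hc, hpc⟩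
        set j := cs.findIdx p with hj
        have hpj : p cs[j] = true := List.findIdx_getElem (w := hflt)
        have hs0mem : cs[j] ∈ pvSeps := by
          simpa [hp, List.contains_iff_mem] using hpj
        have hs0cs : cs[j] ∈ cs := List.getElem_mem hflt
        -- idxOf cs[j] ∈ positions
        have hmemp : cs.idxOf cs[j] ∈ positions := by
          rw [hpos]
          exact List.mem_map.mpr ⟨cs[j], List.mem_filter.mpr
            ⟨hs0mem, by simpa [List.contains_iff_mem] using hs0cs⟩, rfl⟩
        -- every element of positions is ≥ j, and idxOf cs[j] ≤ j
        have hge : ∀ x ∈ positions, j ≤ x := by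
          intro x hx
          rw [hpos] at hx
          obtain ⟨s, hsf, rfl⟩ := List.mem_map.mp hx
          obtain ⟨hsS, hscs⟩ := List.mem_filter.mp hsf
          have hscs' : s ∈ cs := by simpa [List.contains_iff_mem] using hscs
          have hidx : cs.idxOf s < cs.length := List.idxOf_lt_length_of_mem hscs'
          have hget : cs[cs.idxOf s] = s := List.getElem_idxOf hidx
          have : p cs[cs.idxOf s] = true := by
            rw [hget]; simpa [hp, List.contains_iff_mem] using hsS
          exact pv_findIdx_le p cs _ hidx this
        have hle : cs.idxOf cs[j] ≤ j := by
          have : (fun x => x == cs[j]) cs[j] = true := by simp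
          simpa [List.idxOf] using pv_findIdx_le (fun x => x == cs[j]) cs j hflt this
        have hjpos : j ∈ positions := by
          have := hge _ hmemp
          have : cs.idxOf cs[j] = j := le_antisymm hle this
          rwa [this] at hmemp
        have hmin : positions.min? = some j :=
          List.min?_eq_some_iff.mpr ⟨hjpos, hge⟩
        rw [hmin]
        have hmj : min j (cs.length - 1) = j := by omega
        rw [hmj]
      · -- no separator occurs: positions = [], findIdx = length
        push_neg at hany
        have hpos_nil : positions = [] := by
          rw [hpos, List.map_eq_nil_iff, List.filter_eq_nil_iff]
          intro s hsS hscs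
          have hscs' : s ∈ cs := by simpa [List.contains_iff_mem] using hscs
          have : p s = true := by simpa [hp, List.contains_iff_mem] using hsS
          exact absurd this (by simpa using hany s hscs')
        have hfd : cs.findIdx p = cs.length := by
          rw [List.findIdx_eq_length]
          intro x hx
          simpa using hany x hx
        rw [hpos_nil]
        simp only [List.min?_nil]
        rw [hfd]

        have : min cs.length (cs.length - 1) = cs.length - 1 := by omega
        rw [this]

-- ===== VERDICT (by name: the statement is the Claim_ definition above) =====
theorem detect_token_spec : Claim_equal_detect_token := by
  intro line _
  exact detect_token_spec_aux line
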